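-- pv_equiv track=rewrite | github.com/freelulul/ppd | ppd/experiments/append_prefill_profiling.py | generate_text
-- ===== SOURCE A (Python) =====
-- def generate_text(num_tokens: int, seed: int = 0) -> str:
--     """Generate deterministic text approximating num_tokens"""
--     words = [
--         "The", "quick", "brown", "fox", "jumps", "over", "lazy", "dog",
--         "while", "exploring", "vast", "digital", "landscapes", "of",
--         "modern", "technology", "and", "artificial", "intelligence",
--         "systems", "that", "process", "natural", "language", "with",
--         "remarkable", "efficiency", "using", "transformer", "architectures",
--         "designed", "for", "parallel", "computation", "across", "multiple",
--         "attention", "heads", "enabling", "contextual", "understanding"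
--     ]
--     chars_needed = num_tokens * 4
--     result = []
--     i = seed
--     while len(" ".join(result)) < chars_needed:
--         result.append(words[i % len(words)])
--         i += 1
--     return " ".join(result)[:chars_needed]
-- ===== SOURCE B (Python) =====
-- def generate_text(num_tokens: int, seed: int = 0) -> str:
--     """Generate deterministic text approximating num_tokens"""
--     words = [
--         "The", "quick", "brown", "fox", "jumps", "over", "lazy", "dog",
--         "while", "exploring", "vast", "digital", "landscapes", "of",
--         "modern", "technology", "and", "artificial", "intelligence",
--         "systems", "that", "process", "natural", "language", "with",
--         "remarkable", "efficiency", "using", "transformer", "architectures",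
--         "designed", "for", "parallel", "computation", "across", "multiple",
--         "attention", "heads", "enabling", "contextual", "understanding"
--     ]
--     # Emit exactly the needed characters chunk by chunk: each step yields the
--     # next word (with its leading separator), clipped to the remaining budget.
--     # No joined string is ever re-measured and no final slice is needed.
--     remaining = num_tokens * 4
--     pieces = []
--     i = seed
--     first = True
--     while remaining > 0:
--         w = words[i % len(words)]
--         chunk = w if first else " " + w
--         pieces.append(chunk[:remaining])
--         remaining -= len(chunk)
--         first = False
--         i += 1
--     return "".join(pieces)
-- ===== Notes on version B (the rewrite author's own statement) =====
-- stated objective: faster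
-- what changed: Replaces the while-loop that re-joins the whole accumulated word list on every iteration (testing its length against the target, then slicing) with a budget-driven chunk emitter: it keeps a remaining character count, appends each word (with its leading separator) clipped to that budget, and stops when the budget is spent, so no join is ever re-measured and no final slice exists.
import Mathlib
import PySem

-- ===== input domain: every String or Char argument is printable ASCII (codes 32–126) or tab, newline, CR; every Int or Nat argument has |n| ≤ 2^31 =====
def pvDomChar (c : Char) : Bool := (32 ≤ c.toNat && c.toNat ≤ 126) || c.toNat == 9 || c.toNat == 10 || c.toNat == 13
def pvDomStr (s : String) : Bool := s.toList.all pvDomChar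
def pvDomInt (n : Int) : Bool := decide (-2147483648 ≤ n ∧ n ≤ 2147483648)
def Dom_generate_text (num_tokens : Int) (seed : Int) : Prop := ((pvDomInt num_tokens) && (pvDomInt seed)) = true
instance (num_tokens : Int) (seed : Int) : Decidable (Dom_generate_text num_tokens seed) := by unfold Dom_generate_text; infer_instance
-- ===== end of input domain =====

-- B replaces A's while-loop (which re-joins the accumulated list every iteration and
-- slices at the end) by a budget-driven chunk emitter producing exactly the needed chars.

-- ===== PORT A =====
-- the shared word table of both Python sources
def pvWords : List String := [
  "The", "quick", "brown", "fox", "jumps", "over", "lazy", "dog",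
  "while", "exploring", "vast", "digital", "landscapes", "of",
  "modern", "technology", "and", "artificial", "intelligence",
  "systems", "that", "process", "natural", "language", "with",
  "remarkable", "efficiency", "using", "transformer", "architectures",
  "designed", "for", "parallel", "computation", "across", "multiple",
  "attention", "heads", "enabling", "contextual", "understanding"]

-- words[i % len(words)]: the index is always in range (0 ≤ i % 41 < 41), so pyGetD's
-- default is never used and this is exactly Python's words[i % len(words)]
def pvWordAt (i : Int) : String :=
  PySem.List.pyGetD pvWords (PySem.Int.mod i (pvWords.length : Int)) ""

-- joined length grows by at least 2 per appended word (stated here because the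
-- loop's termination proof cites it; proved via the join shape)
theorem pvJoin_snoc_len (L : List String) (w : String) (hw : 2 ≤ w.toList.length) :
    (PySem.Str.join " " L).toList.length + 2 ≤ (PySem.Str.join " " (L ++ [w])).toList.length := by
  rcases L with _ | ⟨a, L'⟩
  · simpa [PySem.Str.join, PySem.Chars.join_singleton] using hw
  · have : (List.map String.toList (a :: L')) ≠ [] := by simp
    have hsnoc : ∀ (sep : List Char) (M : List (List Char)) (wc : List Char), M ≠ [] →
        PySem.Chars.join sep (M ++ [wc]) = PySem.Chars.join sep M ++ sep ++ wc := by
      intro sep M wc hM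
      induction M with
      | nil => simp at hM
      | cons x M' ih =>
        rcases M' with _ | ⟨y, M''⟩
        · simp [PySem.Chars.join_singleton, PySem.Chars.join_cons_cons]
        · have hshape : (x :: y :: M'') ++ [wc] = x :: ((y :: M'') ++ [wc]) := by simp
          rw [hshape, List.cons_append, PySem.Chars.join_cons_cons, ← List.cons_append,
              ih (by simp), PySem.Chars.join_cons_cons]
          simp [List.append_assoc]
    simp only [PySem.Str.join, String.toList_ofList, List.map_append, List.map_cons,
      List.map_nil]
    rw [hsnoc _ _ _ (by simp)]
    have hsep : (" ".toList).length = 1 := by decide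
    simp only [List.length_append]
    omega

theorem pvWordAt_len (i : Int) : 2 ≤ (pvWordAt i).toList.length := by
  have h0 : (0:Int) < (pvWords.length : Int) := by decide
  have h1 := PySem.Int.mod_nonneg i h0
  have h2 := PySem.Int.mod_lt i h0
  rw [pvWordAt, PySem.List.pyGetD_eq_getElem pvWords "" h1 h2]
  have hm : pvWords[(PySem.Int.mod i (pvWords.length : Int)).toNat] ∈ pvWords :=
    List.getElem_mem _
  have : ∀ w ∈ pvWords, 2 ≤ w.toList.length := by decide
  exact this _ hm

-- the while loop of A, over the same state (result, i)
def pvLoopA (c : Int) (result : List String) (i : Int) : List String :=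
  if PySem.Str.len (PySem.Str.join " " result) < c then
    pvLoopA c (result ++ [pvWordAt i]) (i + 1)
  else result
termination_by (c - PySem.Str.len (PySem.Str.join " " result)).toNat
decreasing_by
  have h2 := pvJoin_snoc_len result (pvWordAt i) (pvWordAt_len i)
  simp only [PySem.Str.len_eq] at *
  omega

def generate_text (num_tokens : Int) (seed : Int) : String :=
  let chars_needed := num_tokens * 4
  PySem.Str.slice (PySem.Str.join " " (pvLoopA chars_needed [] seed)) none (some chars_needed)

-- ===== PORT B =====
-- B's word lookup: words[i % len(words)]; Lean's % on Int is emod which, for the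
-- positive divisor 41, is exactly Python's %, and the index is in range, so getD
-- never uses its default
def pvWordB (i : Int) : List Char :=
  (pvWords.getD (i % (pvWords.length : Int)).toNat "").toList

-- every word has at least 2 characters (cited by pvEmit's termination proof)
theorem pvWordB_len (i : Int) : 2 ≤ (pvWordB i).length := by
  have h1 : (0:Int) ≤ i % (pvWords.length : Int) := Int.emod_nonneg i (by decide)
  have h2 : i % (pvWords.length : Int) < (pvWords.length : Int) :=
    Int.emod_lt_of_pos i (by decide)
  rw [pvWordB, List.getD_eq_getElem pvWords "" (by omega)]
  have hm : pvWords[(i % (pvWords.length : Int)).toNat] ∈ pvWords := List.getElem_mem _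
  have : ∀ w ∈ pvWords, 2 ≤ w.toList.length := by decide
  exact this _ hm

-- the while loop of B, over the state (remaining, i, first); each step emits the next
-- chunk (word, with a leading space unless first) clipped to the remaining budget
def pvEmit (remaining : Int) (i : Int) (first : Bool) : List Char :=
  if _h : 0 < remaining then
    let chunk := match first with
      | true => pvWordB i
      | false => ' ' :: pvWordB i
    chunk.take remaining.toNat ++ pvEmit (remaining - chunk.length) (i + 1) false
  else []
termination_by remaining.toNat
decreasing_by
  have hw := pvWordB_len i
  rcases first with _ | _ <;> simp <;> omega

def generate_text_alt (num_tokens : Int) (seed : Int) : String :=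
  String.ofList (pvEmit (num_tokens * 4) seed true)

-- ===== PRECONDITION & SPEC =====
def Spec_generate_text (num_tokens : Int) (seed : Int) (out : String) : Prop := out = generate_text_alt num_tokens seed
instance (num_tokens : Int) (seed : Int) (out : String) : Decidable (Spec_generate_text num_tokens seed out) := by unfold Spec_generate_text; infer_instance

-- ===== CLAIM (what is proved, stated in full; the proofs are below) =====
def Claim_equal_generate_text : Prop := ∀ (num_tokens : Int) (seed : Int), Dom_generate_text num_tokens seed → Spec_generate_text num_tokens seed (generate_text num_tokens seed)

-- ===== LEMMAS AND PROOFS =====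

-- the two word lookups agree
theorem pvWordB_eq (i : Int) : pvWordB i = (pvWordAt i).toList := by
  rw [pvWordB, pvWordAt, PySem.Int.mod_eq_emod_of_pos (a := i) (by decide)]
  have h1 : (0:Int) ≤ i % (pvWords.length : Int) := Int.emod_nonneg i (by decide)
  have h2 : i % (pvWords.length : Int) < (pvWords.length : Int) :=
    Int.emod_lt_of_pos i (by decide)
  rw [PySem.List.pyGetD_eq_getElem pvWords "" h1 h2, List.getD_eq_getElem pvWords "" (by omega)]

-- join L is a prefix of join (L ++ R)
theorem pvJoin_prefix (sep : List Char) (L R : List (List Char)) :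
    PySem.Chars.join sep L <+: PySem.Chars.join sep (L ++ R) := by
  induction L with
  | nil => exact List.nil_prefix
  | cons a L' ih =>
    rcases L' with _ | ⟨b, L''⟩
    · rcases R with _ | ⟨r, R'⟩
      · simp
      · rw [PySem.Chars.join_singleton, List.singleton_append, PySem.Chars.join_cons_cons]
        exact ((List.prefix_append _ _).trans (List.prefix_append _ _))
    · rw [List.cons_append, PySem.Chars.join_cons_cons, List.cons_append,
          PySem.Chars.join_cons_cons, List.append_assoc, List.append_assoc]
      exact (List.prefix_append_right_inj _).mpr ((List.prefix_append_right_inj _).mpr ih)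

-- taking at most (join L).length characters ignores any appended suffix of words
theorem pvTake_join (m : Nat) (L R : List String)
    (h : m ≤ (PySem.Str.join " " L).toList.length) :
    ((PySem.Str.join " " (L ++ R)).toList.take m) = ((PySem.Str.join " " L).toList.take m) := by
  obtain ⟨t, ht⟩ := pvJoin_prefix (" ".toList) (L.map String.toList) (R.map String.toList)
  simp only [PySem.Str.join, String.toList_ofList] at *
  rw [List.map_append, ← ht]
  exact List.take_append_of_le_length h

-- A's loop, started anywhere, agrees with the straight-line build of n more words
-- on the first c characters, provided c ≤ (joined length of result) + 2*n
theorem pvLoop_take (c : Int) (n : Nat) : ∀ (result : List String) (i : Int),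
    c ≤ ((PySem.Str.join " " result).toList.length : Int) + 2 * n →
    ((PySem.Str.join " " (pvLoopA c result i)).toList.take c.toNat) =
    ((PySem.Str.join " " (result ++ (List.range n).map (fun (j : Nat) => pvWordAt (i + (j : Int))))).toList.take c.toNat) := by
  induction n with
  | zero =>
    intro result i h
    rw [pvLoopA, if_neg (by simp only [PySem.Str.len_eq]; omega)]
    simp
  | succ n ih =>
    intro result i h
    by_cases hlt : PySem.Str.len (PySem.Str.join " " result) < c
    · rw [pvLoopA, if_pos hlt]
      have hstep := pvJoin_snoc_len result (pvWordAt i) (pvWordAt_len i)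
      have := ih (result ++ [pvWordAt i]) (i + 1) (by push_cast at *; omega)
      rw [this]
      have htail : (List.range n).map (fun (j : Nat) => pvWordAt (i + 1 + (j : Int))) =
          (List.range n).map ((fun (j : Nat) => pvWordAt (i + (j : Int))) ∘ Nat.succ) :=
        List.map_congr_left (fun j _ => by
          simp only [Function.comp_apply]
          congr 1
          push_cast
          ring)
      rw [List.append_assoc, List.singleton_append, List.range_succ_eq_map,
          List.map_cons, List.map_map, htail]
      norm_num
    · rw [pvLoopA, if_neg hlt]
      simp only [PySem.Str.len_eq, not_lt] at hlt
      exact (pvTake_join c.toNat result _ (by omega)).symm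

-- the straight-line stream of n words, each preceded by its separator
def pvR : Nat → Int → List Char
  | 0, _ => []
  | n + 1, i => (' ' :: pvWordB i) ++ pvR n (i + 1)

-- B's emitter in the non-first state is the budget-clipped prefix of that stream
theorem pvEmit_false (n : Nat) : ∀ (c i : Int), c ≤ 3 * n →
    pvEmit c i false = (pvR n i).take c.toNat := by
  induction n with
  | zero =>
    intro c i h
    have h0 : ¬ 0 < c := by omega
    rw [pvEmit, dif_neg h0]
    simp [pvR]
  | succ n ih =>
    intro c i h
    by_cases hc : 0 < c
    · rw [pvEmit, dif_pos hc]
      have hw := pvWordB_len i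
      have hih := ih (c - ((' ' :: pvWordB i : List Char)).length) (i + 1)
        (by simp only [List.length_cons]; push_cast; omega)
      show List.take c.toNat (' ' :: pvWordB i) ++
          pvEmit (c - ((' ' :: pvWordB i : List Char)).length) (i + 1) false = _
      rw [hih, pvR, List.take_append]
      congr 1
      congr 1
      simp only [List.length_cons]
      omega
    · rw [pvEmit, dif_neg hc]
      have : c.toNat = 0 := by omega
      rw [this]
      simp

-- the joined range build, viewed as first word ++ separator-led stream
theorem pvJoin_eq_R (n : Nat) : ∀ (i : Int),
    (PySem.Str.join " " ((List.range (n + 1)).map (fun (j : Nat) => pvWordAt (i + (j : Int))))).toList =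
    pvWordB i ++ pvR n (i + 1) := by
  induction n with
  | zero =>
    intro i
    simp [PySem.Str.join, PySem.Chars.join_singleton, pvR, pvWordB_eq]
  | succ n ih =>
    intro i
    have hshift : (List.range (n + 1)).map (fun (j : Nat) => pvWordAt (i + 1 + (j : Int))) =
        (List.range (n + 1)).map ((fun (j : Nat) => pvWordAt (i + (j : Int))) ∘ Nat.succ) :=
      List.map_congr_left (fun j _ => by
        simp only [Function.comp_apply]
        congr 1
        push_cast
        ring)
    have hcons : (List.range (n + 1 + 1)).map (fun (j : Nat) => pvWordAt (i + (j : Int))) =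
        pvWordAt i :: (List.range (n + 1)).map (fun (j : Nat) => pvWordAt (i + 1 + (j : Int))) := by
      rw [List.range_succ_eq_map, List.map_cons, List.map_map, hshift]
      norm_num
    rw [hcons]
    have := ih (i + 1)
    simp only [PySem.Str.join, String.toList_ofList] at *
    rw [List.map_cons]
    rcases hne : (List.range (n + 1)).map (fun (j : Nat) => pvWordAt (i + 1 + (j : Int))) with _ | ⟨b, M⟩
    · simp at hne
    · rw [hne] at this
      simp only [List.map_cons] at this ⊢
      rw [PySem.Chars.join_cons_cons, this, pvR, pvWordB_eq]
      simp [List.append_assoc]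
      exact (pvWordB_eq i).symm

-- ===== VERDICT (by name: the statement is the Claim_ definition above) =====
theorem generate_text_spec : Claim_equal_generate_text := by
  intro num_tokens seed _
  unfold Spec_generate_text generate_text generate_text_alt
  dsimp only
  set c := num_tokens * 4 with hc
  by_cases hpos : 0 < c
  · -- positive budget: both sides are the first c characters of the word stream from seed
    apply String.toList_inj.mp
    simp only [PySem.Str.slice, PySem.Chars.slice_eq_listSlice, String.toList_ofList,
      String.toList_ofList]
    rw [PySem.List.slice_to _ (le_of_lt hpos)]
    have hA := pvLoop_take c c.toNat [] seed (by
      simp [PySem.Str.join, PySem.Chars.join_nil]; omega)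
    simp only [List.nil_append] at hA
    rw [hA]
    -- B: unfold one emitter step, then compare with the join shape
    have hn : c.toNat = (c.toNat - 1) + 1 := by omega
    rw [pvEmit, dif_pos hpos]
    have hw := pvWordB_len seed
    have hih := pvEmit_false (c.toNat - 1) (c - ((pvWordB seed).length : Int)) (seed + 1) (by omega)
    show _ = List.take c.toNat (pvWordB seed) ++
        pvEmit (c - ((pvWordB seed).length : Int)) (seed + 1) false
    rw [hih, hn, pvJoin_eq_R (c.toNat - 1) seed, List.take_append]
    congr 1
    congr 1
    omega
  · -- budget ≤ 0: A's loop never runs and B emits nothing; both strings are ""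
    have hA : pvLoopA c [] seed = [] := by
      rw [pvLoopA, if_neg (by simp [PySem.Str.len_eq, PySem.Str.join, PySem.Chars.join_nil]; omega)]
    rw [hA, pvEmit, dif_neg hpos]
    simp [PySem.Str.join, PySem.Chars.join_nil, PySem.Str.slice, PySem.List.slice]
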